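-- pv_equiv track=rewrite | github.com/carlosmada22/DeSi | src/desi/processor/content_normalizer.py | _extract_metadata_and_content
-- ===== SOURCE A (Python) =====
-- from typing import Dict, List, Optional, Tuple
--
-- def _extract_metadata_and_content(content: str) -> Tuple[Dict[str, str], str]:
--     """Extract metadata and content from file."""
--     metadata = {}
--     lines = content.split('\n')
--     content_start_idx = 0
--
--     # Extract metadata from header
--     for i, line in enumerate(lines):
--         if line.startswith('Title: '):
--             metadata['title'] = line[len('Title: '):].strip()
--         elif line.startswith('URL: '):
--             metadata['url'] = line[len('URL: '):].strip()
--         elif line.startswith('Source: '):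
--             metadata['source'] = line[len('Source: '):].strip()
--         elif line.strip() == '---':
--             content_start_idx = i + 1
--             break
--
--     # Extract content after metadata separator
--     raw_content = '\n'.join(lines[content_start_idx:]).strip()
--
--     return metadata, raw_content
-- ===== SOURCE B (Python) =====
-- def _extract_metadata_and_content(content):
--     """Extract metadata and content from file."""
--     lines = content.split('\n')
--     sep_idx = next((i for i, line in enumerate(lines) if line.strip() == '---'), None)
--     header_lines = lines if sep_idx is None else lines[:sep_idx]
--     metadata = {}
--     for line in header_lines:
--         if line.startswith('Title: '):
--             metadata['title'] = line[len('Title: '):].strip()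
--         elif line.startswith('URL: '):
--             metadata['url'] = line[len('URL: '):].strip()
--         elif line.startswith('Source: '):
--             metadata['source'] = line[len('Source: '):].strip()
--     body_start = 0 if sep_idx is None else sep_idx + 1
--     raw_content = '\n'.join(lines[body_start:]).strip()
--     return metadata, raw_content
-- ===== Notes on version B (the rewrite author's own statement) =====
-- stated objective: alternative
-- what changed: A's single loop that interleaves metadata collection with a break at the separator line is replaced by a two-phase decomposition: first locate the separator index, then fold the prefix checks over the header slice only, and slice the body from the recorded start.
import Mathlib
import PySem

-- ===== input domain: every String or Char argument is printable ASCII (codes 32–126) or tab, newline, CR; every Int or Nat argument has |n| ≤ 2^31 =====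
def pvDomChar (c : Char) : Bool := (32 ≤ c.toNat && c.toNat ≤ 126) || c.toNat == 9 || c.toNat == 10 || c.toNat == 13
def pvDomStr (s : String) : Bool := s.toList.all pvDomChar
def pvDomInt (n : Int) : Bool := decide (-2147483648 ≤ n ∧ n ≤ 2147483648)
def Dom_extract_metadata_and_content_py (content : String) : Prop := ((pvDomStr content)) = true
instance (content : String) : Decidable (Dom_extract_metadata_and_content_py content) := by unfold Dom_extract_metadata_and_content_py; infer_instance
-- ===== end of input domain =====

-- ===== PORT A =====
-- A: one loop over the lines that inserts metadata and breaks at the first '---' line.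
def pvAloop (lines : List String) (i : Int) (md : PySem.Dict String String) :
    PySem.Dict String String × Int :=
  match lines with
  | [] => (md, 0)
  | l :: rest =>
    if PySem.Str.startswith l "Title: " then
      pvAloop rest (i + 1) (md.insert "title" (PySem.Str.strip (PySem.Str.slice l (some 7) none)))
    else if PySem.Str.startswith l "URL: " then
      pvAloop rest (i + 1) (md.insert "url" (PySem.Str.strip (PySem.Str.slice l (some 5) none)))
    else if PySem.Str.startswith l "Source: " then
      pvAloop rest (i + 1) (md.insert "source" (PySem.Str.strip (PySem.Str.slice l (some 8) none)))
    else if PySem.Str.strip l == "---" then (md, i + 1)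
    else pvAloop rest (i + 1) md

def extract_metadata_and_content_py (content : String) : (List (String × String)) × String :=
  let lines := (PySem.Chars.splitOn content.toList ['\n']).map String.ofList
  let r := pvAloop lines 0 PySem.Dict.empty
  (r.1.items, PySem.Str.strip (PySem.Str.join "\n" (PySem.List.slice lines (some r.2) none)))

-- ===== PORT B =====
-- B: find the separator index first, then fold the prefix checks over the header slice only.
def pvIsSep (l : String) : Bool := PySem.Str.strip l == "---"

def pvBstep (md : PySem.Dict String String) (l : String) : PySem.Dict String String :=
  if PySem.Str.startswith l "Title: " then
    md.insert "title" (PySem.Str.strip (PySem.Str.slice l (some 7) none))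
  else if PySem.Str.startswith l "URL: " then
    md.insert "url" (PySem.Str.strip (PySem.Str.slice l (some 5) none))
  else if PySem.Str.startswith l "Source: " then
    md.insert "source" (PySem.Str.strip (PySem.Str.slice l (some 8) none))
  else md

def extract_metadata_and_content_py_alt (content : String) : (List (String × String)) × String :=
  let lines := (PySem.Chars.splitOn content.toList ['\n']).map String.ofList
  let sepIdx? := lines.findIdx? pvIsSep
  let header := match sepIdx? with | some k => lines.take k | none => lines
  let md := header.foldl pvBstep PySem.Dict.empty
  let start : Int := match sepIdx? with | some k => (k : Int) + 1 | none => 0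
  (md.items, PySem.Str.strip (PySem.Str.join "\n" (PySem.List.slice lines (some start) none)))

-- ===== PRECONDITION & SPEC =====
def Spec_extract_metadata_and_content_py (content : String) (out : (List (String × String)) × String) : Prop := out = extract_metadata_and_content_py_alt content
instance (content : String) (out : (List (String × String)) × String) : Decidable (Spec_extract_metadata_and_content_py content out) := by unfold Spec_extract_metadata_and_content_py; infer_instance

-- ===== CLAIM (what is proved, stated in full; the proofs are below) =====
def Claim_equal_extract_metadata_and_content_py : Prop := ∀ (content : String), Dom_extract_metadata_and_content_py content → Spec_extract_metadata_and_content_py content (extract_metadata_and_content_py content)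

-- ===== LEMMAS AND PROOFS =====

-- strip of a list starting with a non-space char keeps that char in front
theorem pv_strip_head (c : Char) (cs : List Char) (h : PySem.Chars.isspace c = false) :
    ∃ t, PySem.Chars.strip (c :: cs) = c :: t := by
  unfold PySem.Chars.strip PySem.Chars.lstrip PySem.Chars.rstrip
  rw [List.dropWhile_cons, h]
  simp only [Bool.false_eq_true, if_false]
  set ys := List.dropWhile PySem.Chars.isspace (c :: cs).reverse with hys
  have hsuf : ys <:+ (c :: cs).reverse := List.dropWhile_suffix _
  have hne : ys ≠ [] := by
    intro hnil
    have := List.dropWhile_eq_nil_iff.mp (hys ▸ hnil)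
    have hmem : c ∈ (c :: cs).reverse := by simp
    simpa [h] using this c hmem
  have hpre : ys.reverse <+: c :: cs := by
    have := List.reverse_prefix.mpr hsuf
    simpa using this
  cases hrev : ys.reverse with
  | nil => exact absurd (by simpa using hrev) hne
  | cons d t =>
    rcases hpre with ⟨r, hr⟩
    rw [hrev] at hr
    cases hr
    exact ⟨t, rfl⟩


-- a line starting with a non-space char other than '-' is never the '---' separator
theorem pv_not_sep (l p : String) (c : Char)
    (h : PySem.Str.startswith l p = true) (hp : p.toList.head? = some c)
    (hc : PySem.Chars.isspace c = false) (hd : c ≠ '-') :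
    pvIsSep l = false := by
  unfold pvIsSep
  rw [Bool.eq_false_iff]
  intro hbeq
  have hstr : PySem.Str.strip l = "---" := by simpa using hbeq
  have hlist : PySem.Chars.strip l.toList = ['-', '-', '-'] := by
    have := congrArg String.toList hstr
    simpa [PySem.Str.toList_strip] using this
  have hpre : p.toList <+: l.toList := by
    rw [PySem.Str.startswith_eq] at h
    exact (PySem.Chars.startswith_iff _ _).mp h
  cases hP : p.toList with
  | nil => simp [hP] at hp
  | cons c' t =>
    rw [hP] at hp hpre
    simp at hp
    subst hp
    rcases hpre with ⟨r, hr⟩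
    have : l.toList = c' :: (t ++ r) := by simpa using hr.symm
    rcases pv_strip_head c' (t ++ r) hc with ⟨u, hu⟩
    rw [this, hu] at hlist
    exact hd (by injection hlist)


-- A's break-loop, described by B's two phases: separator index, header fold, body start
theorem pv_loop_eq (lines : List String) (i : Int) (md : PySem.Dict String String) :
    pvAloop lines i md =
      match lines.findIdx? pvIsSep with
      | none => (lines.foldl pvBstep md, 0)
      | some k => ((lines.take k).foldl pvBstep md, i + (k : Int) + 1) := by
  induction lines generalizing i md with
  | nil => simp [pvAloop]
  | cons l rest ih =>
    by_cases h1 : PySem.Str.startswith l "Title: " = true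
    · have hs : pvIsSep l = false :=
        pv_not_sep l "Title: " 'T' h1 (by decide) (by decide) (by decide)
      have hb : ∀ d : PySem.Dict String String, pvBstep d l =
          d.insert "title" (PySem.Str.strip (PySem.Str.slice l (some 7) none)) := by
        intro d; rw [pvBstep, if_pos h1]
      rw [pvAloop, if_pos h1, ih, List.findIdx?_cons, hs]
      cases hf : rest.findIdx? pvIsSep with
      | none => simp [hb]
      | some k =>
        simp [hb, List.take_succ_cons]
        ring
    · by_cases h2 : PySem.Str.startswith l "URL: " = true
      · have hs : pvIsSep l = false :=
          pv_not_sep l "URL: " 'U' h2 (by decide) (by decide) (by decide)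
        have hb : ∀ d : PySem.Dict String String, pvBstep d l =
            d.insert "url" (PySem.Str.strip (PySem.Str.slice l (some 5) none)) := by
          intro d; rw [pvBstep, if_neg h1, if_pos h2]
        rw [pvAloop, if_neg h1, if_pos h2, ih, List.findIdx?_cons, hs]
        cases hf : rest.findIdx? pvIsSep with
        | none => simp [hb]
        | some k =>
          simp [hb, List.take_succ_cons]
          ring
      · by_cases h3 : PySem.Str.startswith l "Source: " = true
        · have hs : pvIsSep l = false :=
            pv_not_sep l "Source: " 'S' h3 (by decide) (by decide) (by decide)
          have hb : ∀ d : PySem.Dict String String, pvBstep d l =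
              d.insert "source" (PySem.Str.strip (PySem.Str.slice l (some 8) none)) := by
            intro d; rw [pvBstep, if_neg h1, if_neg h2, if_pos h3]
          rw [pvAloop, if_neg h1, if_neg h2, if_pos h3, ih, List.findIdx?_cons, hs]
          cases hf : rest.findIdx? pvIsSep with
          | none => simp [hb]
          | some k =>
            simp [hb, List.take_succ_cons]
            ring
        · by_cases h4 : pvIsSep l = true
          · rw [pvAloop, if_neg h1, if_neg h2, if_neg h3, if_pos (by simpa [pvIsSep] using h4),
              List.findIdx?_cons, h4]
            simp
          · have hb : ∀ d : PySem.Dict String String, pvBstep d l = d := by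
              intro d; rw [pvBstep, if_neg h1, if_neg h2, if_neg h3]
            rw [pvAloop, if_neg h1, if_neg h2, if_neg h3,
              if_neg (by simpa [pvIsSep] using h4), ih, List.findIdx?_cons,
              Bool.eq_false_iff.mpr h4]
            cases hf : rest.findIdx? pvIsSep with
            | none => simp [hb]
            | some k =>
              simp [hb, List.take_succ_cons]
              ring

-- ===== VERDICT (by name: the statement is the Claim_ definition above) =====
theorem extract_metadata_and_content_py_spec : Claim_equal_extract_metadata_and_content_py := by
  intro content _
  unfold Spec_extract_metadata_and_content_py extract_metadata_and_content_py extract_metadata_and_content_py_alt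
  simp only [pv_loop_eq]
  cases h : ((PySem.Chars.splitOn content.toList ['\n']).map String.ofList).findIdx? pvIsSep <;>
    simp
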